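-- pv_equiv track=rewrite | github.com/ZQSong1997/AVMFN-For-Person-Verification | utils.py | Id_to_mPath_Dict
-- ===== SOURCE A (Python) =====
-- def Id_to_mPath_Dict(wav_path_list, face_path_list):  # 示例：wav_dev_dict.keys(), face_dev_dict.keys()
--     Wav_Id_mPath_Dict = {}
--     for wav_path in wav_path_list:
--         spk_id = wav_path.split('/')[0]       # wav_path示例：id10270/5r0dWxy17C8/00001.wav  spk_id示例：id10270
--         # 说话人不存在则添加，并且以id为键，添加一个 空list 便于后续存 path
--         if spk_id not in Wav_Id_mPath_Dict:
--             Wav_Id_mPath_Dict[spk_id] = []      # 如：{'id10270':[], 'id10271':[], ..., 'id10309':[] }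
--         # 将同一个说话人的不同wav文件的path 一一添加到同一个 空list 中，这里list是键的值。
--         Wav_Id_mPath_Dict[spk_id].append(wav_path)    # 如：{'id10270':[ [path1],[path2],[path3],...,[path n] ],  ..., }
--     Face_Id_mPath_Dict = {}
--     for face_path in face_path_list:
--         face_id = face_path.split('/')[0]  # face_path示例：id10270/5r0dWxy17C8/0000600.jpg    face_id示例：id10270
--         if face_id not in Face_Id_mPath_Dict:
--             Face_Id_mPath_Dict[face_id] = []      # 如：{'id10270':[], 'id10271':[], ..., 'id10309':[] }
--         # 将同一个说话人的不同jpg文件的path 一一添加到同一个list中，这里list是键的值。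
--         Face_Id_mPath_Dict[face_id].append(face_path)
--     return Wav_Id_mPath_Dict, Face_Id_mPath_Dict
-- ===== SOURCE B (Python) =====
-- def Id_to_mPath_Dict(wav_path_list, face_path_list):
--     # Group paths by their first '/'-component: collect the distinct ids in
--     # first-seen order, then build each group with one filtering comprehension.
--     def group(paths):
--         ids = dict.fromkeys(p.split('/')[0] for p in paths)
--         return {i: [p for p in paths if p.split('/')[0] == i] for i in ids}
--     return group(wav_path_list), group(face_path_list)
-- ===== Notes on version B (the rewrite author's own statement) =====
-- stated objective: idiomatic
-- what changed: A builds each dict incrementally in one loop (insert-empty-then-append per path); B first collects the distinct speaker ids in first-seen order with dict.fromkeys and then builds each group with a single filtering comprehension per id.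
import Mathlib
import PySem

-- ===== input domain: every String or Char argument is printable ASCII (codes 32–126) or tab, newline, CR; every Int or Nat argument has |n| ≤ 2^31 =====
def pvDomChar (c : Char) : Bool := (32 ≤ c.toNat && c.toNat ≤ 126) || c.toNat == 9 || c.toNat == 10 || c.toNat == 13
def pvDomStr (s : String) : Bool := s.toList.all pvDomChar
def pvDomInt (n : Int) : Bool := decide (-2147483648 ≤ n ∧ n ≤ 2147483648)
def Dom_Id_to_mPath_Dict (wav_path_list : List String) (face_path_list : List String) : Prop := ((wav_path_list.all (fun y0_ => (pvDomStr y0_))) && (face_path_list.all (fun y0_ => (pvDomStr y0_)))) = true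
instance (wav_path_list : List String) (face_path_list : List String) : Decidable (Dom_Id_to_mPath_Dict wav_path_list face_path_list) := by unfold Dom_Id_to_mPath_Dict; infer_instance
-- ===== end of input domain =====

-- B groups by id via dedup-of-ids + one filter per id instead of A's incremental
-- dict loop; return values proved identical, objective: idiomatic (no speed claim).

-- shared helper: p.split('/')[0]. split with the nonempty separator "/" always
-- returns `some` of a nonempty list, so the `.getD` defaults are never used.
def pvKey (p : String) : String :=
  ((PySem.Str.split? p "/").getD []).getD 0 ""

-- ===== PORT A =====
-- one loop of A: make an empty list for an unseen id, then append (d[k].append(p))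
def pvGroupA (paths : List String) : PySem.Dict String (List String) :=
  paths.foldl (fun d p =>
    let k := pvKey p
    let d1 := if d.contains k then d else d.insert k []
    d1.modify k [] (fun l => l ++ [p])) PySem.Dict.empty

def Id_to_mPath_Dict (wav_path_list : List String) (face_path_list : List String) : (List (String × List String)) × (List (String × List String)) :=
  ((pvGroupA wav_path_list).items, (pvGroupA face_path_list).items)

-- ===== PORT B =====
-- B's group(): dict.fromkeys of the ids (ordered dedup), then a filtering
-- comprehension per id
def pvGroupB (paths : List String) : List (String × List String) :=
  (PySem.List.dedup (paths.map pvKey)).map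
    (fun i => (i, paths.filter (fun p => pvKey p == i)))

def Id_to_mPath_Dict_alt (wav_path_list : List String) (face_path_list : List String) : (List (String × List String)) × (List (String × List String)) :=
  (pvGroupB wav_path_list, pvGroupB face_path_list)

-- ===== PRECONDITION & SPEC =====
def Spec_Id_to_mPath_Dict (wav_path_list : List String) (face_path_list : List String) (out : (List (String × List String)) × (List (String × List String))) : Prop := out = Id_to_mPath_Dict_alt wav_path_list face_path_list
instance (wav_path_list : List String) (face_path_list : List String) (out : (List (String × List String)) × (List (String × List String))) : Decidable (Spec_Id_to_mPath_Dict wav_path_list face_path_list out) := by unfold Spec_Id_to_mPath_Dict; infer_instance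

-- ===== CLAIM (what is proved, stated in full; the proofs are below) =====
def Claim_equal_Id_to_mPath_Dict : Prop := ∀ (wav_path_list : List String) (face_path_list : List String), Dom_Id_to_mPath_Dict wav_path_list face_path_list → Spec_Id_to_mPath_Dict wav_path_list face_path_list (Id_to_mPath_Dict wav_path_list face_path_list)

-- ===== LEMMAS AND PROOFS =====

-- A's loop body (insert-empty-if-absent, then append) is one `modify`
theorem pvStep_eq (d : PySem.Dict String (List String)) (p : String) :
    (let k := pvKey p
     let d1 := if d.contains k then d else d.insert k []
     d1.modify k [] (fun l => l ++ [p])) = d.modify (pvKey p) [] (fun l => l ++ [p]) := by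
  by_cases h : d.contains (pvKey p) = true
  · simp [h]
  · simp only [Bool.not_eq_true] at h
    simp [h, PySem.Dict.modify, PySem.Dict.insert_insert_self,
      PySem.Dict.getD_insert_self, PySem.Dict.getD_of_not_contains d _ h]

theorem pvGroupA_eq_modify_fold (paths : List String) :
    pvGroupA paths =
      paths.foldl (fun d p => d.modify (pvKey p) [] (fun l => l ++ [p]))
        PySem.Dict.empty := by
  unfold pvGroupA
  exact PySem.List.foldl_congr_mem _ _ _ _ (fun d p _ => pvStep_eq d p)

theorem pvGroupA_items (paths : List String) :
    (pvGroupA paths).items = pvGroupB paths := by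
  have hfold : pvGroupA paths =
      (paths.map (fun p => (pvKey p, p))).foldl
        (fun d q => d.modify q.1 [] (fun l => l ++ [q.2])) PySem.Dict.empty := by
    rw [List.foldl_map]; exact pvGroupA_eq_modify_fold paths
  have hkeys : (pvGroupA paths).keys = PySem.List.dedup (paths.map pvKey) := by
    rw [pvGroupA_eq_modify_fold,
      PySem.Dict.keys_foldl_modify_key paths pvKey []
        (fun _ p l => l ++ [p]) PySem.Dict.empty]
    simp [PySem.List.dedup_eq_ofList, PySem.Set.ofList, PySem.Set.update,
      PySem.Dict.keys_empty]
  have hnodup : (pvGroupA paths).keys.Nodup := by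
    rw [pvGroupA_eq_modify_fold]
    exact PySem.Dict.nodup_keys_foldl_modify_key paths pvKey []
      (fun _ p l => l ++ [p]) PySem.Dict.empty (by simp [PySem.Dict.keys_empty])
  have hget : ∀ c, (pvGroupA paths).getD c [] = paths.filter (fun p => pvKey p == c) := by
    intro c
    rw [hfold, PySem.Dict.getD_foldl_modify_append]
    simp [List.filter_map, Function.comp_def]
  rw [PySem.Dict.items_eq_map_keys _ hnodup [], hkeys]
  unfold pvGroupB
  exact List.map_congr_left (fun i _ => by rw [hget i])

-- ===== VERDICT (by name: the statement is the Claim_ definition above) =====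
theorem Id_to_mPath_Dict_spec : Claim_equal_Id_to_mPath_Dict := by
  intro wav face _
  show Id_to_mPath_Dict wav face = Id_to_mPath_Dict_alt wav face
  unfold Id_to_mPath_Dict Id_to_mPath_Dict_alt
  rw [pvGroupA_items, pvGroupA_items]
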